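-- pv_equiv track=rewrite | github.com/S-Christensen/cartographersStudy | spring/midgameEvaluation.py | magesValley_progress
-- ===== SOURCE A (Python) =====
-- def magesValley_progress(grid):
--     points = 0
--     rows, cols = len(grid), len(grid[0])
--
--     for r in range(rows):
--         for c in range(cols):
--             if grid[r][c] in ("Water", "Farm"):
--                 value = 2 if grid[r][c] == "Water" else 1
--                 for dr, dc in [(1,0), (-1,0), (0,1), (0,-1)]:
--                     nr, nc = r + dr, c + dc
--                     if 0 <= nr < rows and 0 <= nc < cols and grid[nr][nc] == "Mountain":
--                         points += value
--                         break
--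
--     return points
-- ===== SOURCE B (Python) =====
-- def magesValley_progress(grid):
--     rows, cols = len(grid), len(grid[0])
--     mountains = [(r, c) for r in range(rows) for c in range(cols)
--                  if grid[r][c] == "Mountain"]
--     scored = set()
--     for r, c in mountains:
--         for nr, nc in ((r + 1, c), (r - 1, c), (r, c + 1), (r, c - 1)):
--             if 0 <= nr < rows and 0 <= nc < cols and grid[nr][nc] in ("Water", "Farm"):
--                 scored.add((nr, nc))
--     return sum(2 if grid[r][c] == "Water" else 1 for r, c in scored)
-- ===== Notes on version B (the rewrite author's own statement) =====
-- stated objective: alternative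
-- what changed: Tile-centric double loop with a per-tile break over directions is replaced by a mountain-centric pass: collect mountain coordinates, mark each in-bounds Water/Farm neighbor in a set keyed by position (deduplicating tiles adjacent to several mountains), then sum the marked tiles' values.
import Mathlib
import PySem

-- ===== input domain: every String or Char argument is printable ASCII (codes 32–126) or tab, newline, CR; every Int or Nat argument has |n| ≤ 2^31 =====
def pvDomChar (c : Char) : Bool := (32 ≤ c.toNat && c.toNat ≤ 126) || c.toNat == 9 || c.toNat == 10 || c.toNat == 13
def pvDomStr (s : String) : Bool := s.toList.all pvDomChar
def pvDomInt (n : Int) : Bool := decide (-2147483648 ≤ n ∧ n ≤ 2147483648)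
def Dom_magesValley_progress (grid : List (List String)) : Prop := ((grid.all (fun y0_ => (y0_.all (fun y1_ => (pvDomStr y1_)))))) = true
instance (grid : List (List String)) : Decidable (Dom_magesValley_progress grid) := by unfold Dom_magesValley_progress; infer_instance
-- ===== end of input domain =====

-- B replaces A's tile-centric scan (per-tile break over directions) by a mountain-centric pass
-- that marks scoring neighbors in a position-keyed set and sums them (alternative decomposition).
-- Equivalence is about the return value; neither program mutates its argument.


-- ===== PORT A =====
-- grid[r][c]: under Pre_ every access A makes is in range, so the getD default is never read
def pvCell (grid : List (List String)) (r c : Nat) : String := (grid.getD r []).getD c ""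

def pvDirs : List (Int × Int) := [(1,0),(-1,0),(0,1),(0,-1)]

-- A's inner 'for dr,dc …: if …: points += value; break' loop: value at the first mountain
-- neighbor, else 0 (the guard 0 ≤ nr/nc makes nr.toNat exact)
def pvNbrLoop (grid : List (List String)) (rows cols : Nat) (r c : Nat) (value : Int) :
    List (Int × Int) → Int
  | [] => 0
  | d :: ds =>
      let nr : Int := (r : Int) + d.1
      let nc : Int := (c : Int) + d.2
      if 0 ≤ nr ∧ nr < (rows : Int) ∧ 0 ≤ nc ∧ nc < (cols : Int) ∧
          pvCell grid nr.toNat nc.toNat = "Mountain"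
      then value
      else pvNbrLoop grid rows cols r c value ds

def magesValley_progress (grid : List (List String)) : Int :=
  let rows := grid.length
  let cols := (grid.headD []).length
  (List.range rows).foldl (fun points r =>
    (List.range cols).foldl (fun points c =>
      let cell := pvCell grid r c
      if cell = "Water" ∨ cell = "Farm" then
        points + pvNbrLoop grid rows cols r c (if cell = "Water" then 2 else 1) pvDirs
      else points) points) 0

-- ===== PORT B =====
-- the four neighbor candidates of a cell, kept when in bounds
-- (B's 'if 0 <= nr < rows and 0 <= nc < cols' guard; toNat exact under the 0 ≤ guard)
def pvNbrs (rows cols : Nat) (rc : Nat × Nat) : List (Nat × Nat) :=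
  ([((rc.1 : Int) + 1, (rc.2 : Int)), ((rc.1 : Int) - 1, (rc.2 : Int)),
    ((rc.1 : Int), (rc.2 : Int) + 1), ((rc.1 : Int), (rc.2 : Int) - 1)]).filterMap
    (fun p => if 0 ≤ p.1 ∧ p.1 < (rows : Int) ∧ 0 ≤ p.2 ∧ p.2 < (cols : Int)
              then some (p.1.toNat, p.2.toNat) else none)

def magesValley_progress_alt (grid : List (List String)) : Int :=
  let rows := grid.length
  let cols := (grid.headD []).length
  let mountains := (List.range rows).flatMap (fun r =>
    (List.range cols).filterMap (fun c =>
      if pvCell grid r c = "Mountain" then some (r, c) else none))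
  let scored : PySem.Set (Nat × Nat) := mountains.foldl (fun s m =>
    (pvNbrs rows cols m).foldl (fun s n =>
      if pvCell grid n.1 n.2 = "Water" ∨ pvCell grid n.1 n.2 = "Farm"
      then PySem.Set.add s n else s) s) PySem.Set.empty
  -- sum over the set: an Int sum does not depend on Python's set-iteration order
  (scored.map (fun rc => if pvCell grid rc.1 rc.2 = "Water" then (2 : Int) else 1)).sum

-- ===== PRECONDITION & SPEC =====
-- Pre_ excludes exactly the inputs where A raises IndexError: the empty grid (len(grid[0]))
-- and grids with some row shorter than the first row (A reads grid[r][c] for every c < cols).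
def Pre_magesValley_progress (grid : List (List String)) : Prop :=
  grid ≠ [] ∧ ∀ row ∈ grid, (grid.headD []).length ≤ row.length
instance (grid : List (List String)) : Decidable (Pre_magesValley_progress grid) := by
  unfold Pre_magesValley_progress; infer_instance

def pvWitness_magesValley_progress : List (List String) :=
  [["Water", "Mountain", "Water"], ["Farm", "Water", "Mountain"]]

def Spec_magesValley_progress (grid : List (List String)) (out : Int) : Prop := out = magesValley_progress_alt grid
instance (grid : List (List String)) (out : Int) : Decidable (Spec_magesValley_progress grid out) := by unfold Spec_magesValley_progress; infer_instance

-- ===== CLAIM (what is proved, stated in full; the proofs are below) =====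
def Claim_equal_magesValley_progress : Prop := ∀ (grid : List (List String)), Dom_magesValley_progress grid → Pre_magesValley_progress grid → Spec_magesValley_progress grid (magesValley_progress grid)

-- ===== LEMMAS AND PROOFS =====

-- a cell scores iff it holds Water or Farm and has an in-bounds Mountain neighbor
def pvHasM (grid : List (List String)) (rows cols : Nat) (rc : Nat × Nat) : Bool :=
  (pvNbrs rows cols rc).any (fun n => pvCell grid n.1 n.2 == "Mountain")

def pvWorth (grid : List (List String)) (rc : Nat × Nat) : Int :=
  if pvCell grid rc.1 rc.2 = "Water" then 2 else 1

def pvScore (grid : List (List String)) (rows cols : Nat) (rc : Nat × Nat) : Int :=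
  if (pvCell grid rc.1 rc.2 = "Water" ∨ pvCell grid rc.1 rc.2 = "Farm") ∧
      pvHasM grid rows cols rc
  then pvWorth grid rc else 0

def pvCells (rows cols : Nat) : List (Nat × Nat) :=
  (List.range rows).flatMap (fun r => (List.range cols).map (fun c => (r, c)))

theorem pv_ite_orchain (P1 P2 P3 P4 : Prop) [Decidable P1] [Decidable P2] [Decidable P3]
    [Decidable P4] (v : Int) :
    (if P1 then v else if P2 then v else if P3 then v else if P4 then v else 0) =
      if P1 ∨ P2 ∨ P3 ∨ P4 then v else 0 := by
  split_ifs <;> tauto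

theorem pvNbrLoop_eq (grid : List (List String)) (rows cols r c : Nat) (v : Int) :
    pvNbrLoop grid rows cols r c v pvDirs =
      if pvHasM grid rows cols (r, c) then v else 0 := by
  have h : pvHasM grid rows cols (r, c) = true ↔
      (0 ≤ (r:Int) + 1 ∧ (r:Int) + 1 < (rows:Int) ∧ c < cols ∧ pvCell grid (r+1) c = "Mountain") ∨
      (1 ≤ r ∧ r ≤ rows ∧ c < cols ∧ pvCell grid (r-1) c = "Mountain") ∨
      (r < rows ∧ 0 ≤ (c:Int) + 1 ∧ (c:Int) + 1 < (cols:Int) ∧ pvCell grid r (c+1) = "Mountain") ∨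
      (r < rows ∧ 1 ≤ c ∧ c ≤ cols ∧ pvCell grid r (c-1) = "Mountain") := by
    simp [pvHasM, pvNbrs]
    aesop
  simp only [h]
  simp [pvNbrLoop, pvDirs, ← sub_eq_add_neg]
  exact pv_ite_orchain _ _ _ _ v

theorem pvFoldl_add_sum {α : Type} (f : α → Int) (l : List α) (init : Int) :
    l.foldl (fun acc x => acc + f x) init = init + (l.map f).sum := by
  induction l generalizing init with
  | nil => simp
  | cons a t ih => simp [ih]; ring

theorem pvA_eq_sum (grid : List (List String)) :
    magesValley_progress grid =
      ((pvCells grid.length (grid.headD []).length).map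
        (pvScore grid grid.length (grid.headD []).length)).sum := by
  unfold magesValley_progress
  simp only [pvNbrLoop_eq]
  have hinner : ∀ (r : Nat) (points : Int),
      (List.range (grid.headD []).length).foldl (fun points c =>
        let cell := pvCell grid r c
        if cell = "Water" ∨ cell = "Farm" then
          points + (if pvHasM grid grid.length (grid.headD []).length (r, c)
                    then (if cell = "Water" then 2 else 1) else 0)
        else points) points
      = points + ((List.range (grid.headD []).length).map
          (fun c => pvScore grid grid.length (grid.headD []).length (r, c))).sum := by
    intro r points
    have hb : (fun (points : Int) (c : Nat) =>
        let cell := pvCell grid r c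
        if cell = "Water" ∨ cell = "Farm" then
          points + (if pvHasM grid grid.length (grid.headD []).length (r, c)
                    then (if cell = "Water" then 2 else 1) else 0)
        else points)
        = fun points c => points + pvScore grid grid.length (grid.headD []).length (r, c) := by
      funext p c
      simp only [pvScore, pvWorth]
      split_ifs <;> simp_all
    rw [hb, pvFoldl_add_sum]
  simp only [hinner]
  rw [pvFoldl_add_sum]
  simp [pvCells, List.flatMap_def, List.sum_flatten, List.map_map, Function.comp_def]

theorem pv_mem_nbrs (rows cols : Nat) (rc n : Nat × Nat) :
    n ∈ pvNbrs rows cols rc ↔ n.1 < rows ∧ n.2 < cols ∧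
      ((n.1 = rc.1 + 1 ∧ n.2 = rc.2) ∨ (1 ≤ rc.1 ∧ n.1 = rc.1 - 1 ∧ n.2 = rc.2) ∨
       (n.1 = rc.1 ∧ n.2 = rc.2 + 1) ∨ (1 ≤ rc.2 ∧ n.1 = rc.1 ∧ n.2 = rc.2 - 1)) := by
  obtain ⟨a, b⟩ := n
  simp [pvNbrs, List.mem_filterMap]
  constructor
  · rintro (⟨h, h1, h2⟩ | ⟨h, h1, h2⟩ | ⟨h, h1, h2⟩ | ⟨h, h1, h2⟩) <;> omega
  · rintro ⟨h1, h2, (⟨e1, e2⟩ | ⟨e0, e1, e2⟩ | ⟨e1, e2⟩ | ⟨e0, e1, e2⟩)⟩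
    · exact Or.inl ⟨by omega, by omega, by omega⟩
    · exact Or.inr (Or.inl ⟨by omega, by omega, by omega⟩)
    · exact Or.inr (Or.inr (Or.inl ⟨by omega, by omega, by omega⟩))
    · exact Or.inr (Or.inr (Or.inr ⟨by omega, by omega, by omega⟩))

theorem pv_nbrs_symm (rows cols : Nat) (a b : Nat × Nat) (ha : a ∈ pvNbrs rows cols b)
    (h1 : b.1 < rows) (h2 : b.2 < cols) : b ∈ pvNbrs rows cols a := by
  rw [pv_mem_nbrs] at ha ⊢
  omega

theorem pv_mem_inner (grid : List (List String)) (ns : List (Nat × Nat))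
    (s : PySem.Set (Nat × Nat)) (x : Nat × Nat) :
    (x ∈ ns.foldl (fun s n =>
      if pvCell grid n.1 n.2 = "Water" ∨ pvCell grid n.1 n.2 = "Farm"
      then PySem.Set.add s n else s) s) ↔
      x ∈ s ∨ (x ∈ ns ∧ (pvCell grid x.1 x.2 = "Water" ∨ pvCell grid x.1 x.2 = "Farm")) := by
  induction ns generalizing s with
  | nil => simp
  | cons n t ih =>
    simp only [List.foldl_cons]
    rw [ih]
    by_cases h : pvCell grid n.1 n.2 = "Water" ∨ pvCell grid n.1 n.2 = "Farm"
    · simp only [if_pos h, PySem.Set.mem_add, List.mem_cons]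
      constructor
      · rintro ((hs | rfl) | ht) <;> tauto
      · rintro (hs | ⟨(rfl | hm), hw⟩) <;> tauto
    · simp only [if_neg h, List.mem_cons]
      constructor
      · rintro (hs | ht) <;> tauto
      · rintro (hs | ⟨(rfl | hm), hw⟩) <;> tauto

theorem pv_nodup_inner (grid : List (List String)) (ns : List (Nat × Nat))
    (s : PySem.Set (Nat × Nat)) (hs : s.Nodup) :
    (ns.foldl (fun s n =>
      if pvCell grid n.1 n.2 = "Water" ∨ pvCell grid n.1 n.2 = "Farm"
      then PySem.Set.add s n else s) s).Nodup := by
  induction ns generalizing s with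
  | nil => exact hs
  | cons n t ih =>
    simp only [List.foldl_cons]
    split_ifs with h
    · exact ih _ (PySem.Set.nodup_add _ _ hs)
    · exact ih _ hs

theorem pv_mem_outer (grid : List (List String)) (rows cols : Nat)
    (ms : List (Nat × Nat)) (s : PySem.Set (Nat × Nat)) (x : Nat × Nat) :
    (x ∈ ms.foldl (fun s m =>
      (pvNbrs rows cols m).foldl (fun s n =>
        if pvCell grid n.1 n.2 = "Water" ∨ pvCell grid n.1 n.2 = "Farm"
        then PySem.Set.add s n else s) s) s) ↔
      x ∈ s ∨ (∃ m ∈ ms, x ∈ pvNbrs rows cols m ∧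
        (pvCell grid x.1 x.2 = "Water" ∨ pvCell grid x.1 x.2 = "Farm")) := by
  induction ms generalizing s with
  | nil => simp
  | cons m t ih =>
    simp only [List.foldl_cons]
    rw [ih]
    rw [pv_mem_inner]
    constructor
    · rintro ((hs | ⟨hn, hw⟩) | ⟨m', hm', hn', hw'⟩)
      · exact Or.inl hs
      · exact Or.inr ⟨m, by simp, hn, hw⟩
      · exact Or.inr ⟨m', by simp [hm'], hn', hw'⟩
    · rintro (hs | ⟨m', hm', hn', hw'⟩)
      · exact Or.inl (Or.inl hs)
      · rcases List.mem_cons.mp hm' with rfl | hm''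
        · exact Or.inl (Or.inr ⟨hn', hw'⟩)
        · exact Or.inr ⟨m', hm'', hn', hw'⟩

theorem pv_nodup_outer (grid : List (List String)) (rows cols : Nat)
    (ms : List (Nat × Nat)) (s : PySem.Set (Nat × Nat)) (hs : s.Nodup) :
    (ms.foldl (fun s m =>
      (pvNbrs rows cols m).foldl (fun s n =>
        if pvCell grid n.1 n.2 = "Water" ∨ pvCell grid n.1 n.2 = "Farm"
        then PySem.Set.add s n else s) s) s).Nodup := by
  induction ms generalizing s with
  | nil => exact hs
  | cons m t ih => exact ih _ (pv_nodup_inner grid _ s hs)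

theorem pv_mem_mountains (grid : List (List String)) (rows cols : Nat) (m : Nat × Nat) :
    (m ∈ (List.range rows).flatMap (fun r =>
      (List.range cols).filterMap (fun c =>
        if pvCell grid r c = "Mountain" then some (r, c) else none))) ↔
      m.1 < rows ∧ m.2 < cols ∧ pvCell grid m.1 m.2 = "Mountain" := by
  obtain ⟨a, b⟩ := m
  simp [List.mem_flatMap, List.mem_filterMap, List.mem_range]
  try aesop

theorem pv_sum_map_ite {α : Type} (l : List α) (P : α → Prop) [DecidablePred P] (f : α → Int) :
    (l.map (fun x => if P x then f x else 0)).sum =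
      ((l.filter (fun x => decide (P x))).map f).sum := by
  induction l with
  | nil => simp
  | cons a t ih =>
    by_cases h : P a <;> simp [h, ih]

theorem pv_mem_cells (rows cols : Nat) (x : Nat × Nat) :
    x ∈ pvCells rows cols ↔ x.1 < rows ∧ x.2 < cols := by
  obtain ⟨a, b⟩ := x
  simp [pvCells, List.mem_flatMap]

theorem pv_nodup_cells (rows cols : Nat) : (pvCells rows cols).Nodup := by
  have : pvCells rows cols = (List.range rows) ×ˢ (List.range cols) := rfl
  rw [this]
  exact List.Nodup.product (List.nodup_range) (List.nodup_range)

theorem pvB_eq_sum (grid : List (List String)) :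
    magesValley_progress_alt grid =
      ((pvCells grid.length (grid.headD []).length).map
        (pvScore grid grid.length (grid.headD []).length)).sum := by
  unfold magesValley_progress_alt
  simp only []
  set rows := grid.length with hrows
  set cols := (grid.headD []).length with hcols
  set scored := ((List.range rows).flatMap (fun r =>
    (List.range cols).filterMap (fun c =>
      if pvCell grid r c = "Mountain" then some (r, c) else none))).foldl (fun s m =>
    (pvNbrs rows cols m).foldl (fun s n =>
      if pvCell grid n.1 n.2 = "Water" ∨ pvCell grid n.1 n.2 = "Farm"
      then PySem.Set.add s n else s) s) PySem.Set.empty with hscored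
  have hmem : ∀ x, x ∈ scored ↔ x.1 < rows ∧ x.2 < cols ∧
      ((pvCell grid x.1 x.2 = "Water" ∨ pvCell grid x.1 x.2 = "Farm") ∧
        pvHasM grid rows cols x = true) := by
    intro x
    rw [hscored, pv_mem_outer]
    constructor
    · rintro (hs | ⟨m, hm, hn, hw⟩)
      · simp [PySem.Set.empty] at hs
      · rw [pv_mem_mountains] at hm
        have hb := (pv_mem_nbrs rows cols m x).mp hn
        refine ⟨hb.1, hb.2.1, hw, List.any_eq_true.mpr ⟨m, ?_, beq_iff_eq.mpr hm.2.2⟩⟩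
        exact pv_nbrs_symm rows cols x m hn hm.1 hm.2.1
    · rintro ⟨h1, h2, hw, hM⟩
      obtain ⟨n, hn, hM'⟩ := List.any_eq_true.mp hM
      have hM : pvCell grid n.1 n.2 = "Mountain" := beq_iff_eq.mp hM'
      have hb := (pv_mem_nbrs rows cols x n).mp hn
      refine Or.inr ⟨n, ?_, ?_, hw⟩
      · rw [pv_mem_mountains]; exact ⟨hb.1, hb.2.1, hM⟩
      · exact pv_nbrs_symm rows cols n x hn h1 h2
  have hnd : scored.Nodup := by
    rw [hscored]; exact pv_nodup_outer grid rows cols _ _ (by simp [PySem.Set.empty])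
  have hR : ((pvCells rows cols).map (pvScore grid rows cols)).sum =
      (((pvCells rows cols).filter (fun x => decide
        ((pvCell grid x.1 x.2 = "Water" ∨ pvCell grid x.1 x.2 = "Farm") ∧
          pvHasM grid rows cols x = true))).map (pvWorth grid)).sum := by
    rw [← pv_sum_map_ite]
    rfl
  have hfnd : ((pvCells rows cols).filter (fun x => decide
      ((pvCell grid x.1 x.2 = "Water" ∨ pvCell grid x.1 x.2 = "Farm") ∧
        pvHasM grid rows cols x = true))).Nodup := (pv_nodup_cells rows cols).filter _
  have hperm : scored.Perm ((pvCells rows cols).filter (fun x => decide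
      ((pvCell grid x.1 x.2 = "Water" ∨ pvCell grid x.1 x.2 = "Farm") ∧
        pvHasM grid rows cols x = true))) := by
    apply List.perm_of_nodup_nodup_toFinset_eq hnd hfnd
    ext x
    simp only [List.mem_toFinset, hmem, List.mem_filter, pv_mem_cells, decide_eq_true_eq]
    tauto
  rw [hR]
  have := (hperm.map (pvWorth grid)).sum_eq
  rw [← this]
  rfl

-- ===== VERDICT (by name: the statement is the Claim_ definition above) =====
theorem magesValley_progress_spec : Claim_equal_magesValley_progress := by
  intro grid _ _
  unfold Spec_magesValley_progress
  rw [pvA_eq_sum, pvB_eq_sum]
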